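-- pv_equiv track=rewrite | github.com/daanvdk/fibro | filebrowser/highlight.py | all_keys
-- ===== SOURCE A (Python) =====
-- def all_keys(key):
--     yield key
--     key_len = len(key)
--
--     while True:
--         try:
--             key_len = key.rindex('.', 0, key_len)
--         except ValueError:
--             break
--         yield key[:key_len]
-- ===== SOURCE B (Python) =====
-- def all_keys(key):
--     # single forward pass: collect the prefix before each '.', then emit
--     # the whole key followed by the collected prefixes longest-first
--     yield key
--     prefixes = []
--     cur = ""
--     for ch in key:
--         if ch == '.':
--             prefixes.append(cur)
--         cur += ch
--     yield from reversed(prefixes)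
-- ===== Notes on version B (the rewrite author's own statement) =====
-- stated objective: alternative
-- what changed: Replaces the repeated rindex backward-search-and-slice loop with a single forward pass that accumulates the running prefix and records it at each dot, then emits the whole key followed by the recorded prefixes in reverse (longest-first).
import Mathlib
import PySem

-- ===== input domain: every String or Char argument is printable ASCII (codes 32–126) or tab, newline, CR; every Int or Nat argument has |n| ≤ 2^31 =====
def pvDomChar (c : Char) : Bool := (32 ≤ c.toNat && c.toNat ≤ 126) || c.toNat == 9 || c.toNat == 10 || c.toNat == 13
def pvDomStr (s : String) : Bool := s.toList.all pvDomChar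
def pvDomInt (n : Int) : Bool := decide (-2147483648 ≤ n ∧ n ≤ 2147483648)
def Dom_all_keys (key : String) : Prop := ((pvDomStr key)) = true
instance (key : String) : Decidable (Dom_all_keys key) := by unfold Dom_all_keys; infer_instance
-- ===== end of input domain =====

-- B replaces A's repeated backward rindex-and-slice loop by one forward scan
-- collecting the prefix before each dot, emitted in reverse (alternative, not faster).
-- Both ports return the list of the Python generator's yields.

-- ===== PORT A =====

-- key.rindex('.', 0, n): largest index m < n with key[m] = '.', none = ValueError
def pvRindexDot (cs : List Char) : Nat → Option Nat
  | 0 => none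
  | m + 1 => if cs.getD m ' ' = '.' then some m else pvRindexDot cs m

theorem pvRindexDot_lt (cs : List Char) (n m : Nat) (h : pvRindexDot cs n = some m) : m < n := by
  induction n with
  | zero => simp [pvRindexDot] at h
  | succ k ih =>
    simp only [pvRindexDot] at h
    split at h
    · simp only [Option.some.injEq] at h; omega
    · exact Nat.lt_trans (ih h) (Nat.lt_succ_self k)

-- the while-loop of A: state is key_len, each step rindex then yield key[:key_len]
def pvLoopA (cs : List Char) (n : Nat) : List (List Char) :=
  match h : pvRindexDot cs n with
  | none => []
  | some m => cs.take m :: pvLoopA cs m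
termination_by n
decreasing_by exact pvRindexDot_lt cs n m h

def all_keys (key : String) : List String :=
  key :: (pvLoopA key.toList key.toList.length).map String.mk

-- ===== PORT B =====

-- the for-loop of B: state is (prefixes, cur); at '.' append cur, always cur += ch
def pvStepB (acc : List (List Char) × List Char) (ch : Char) : List (List Char) × List Char :=
  ((if ch = '.' then acc.1 ++ [acc.2] else acc.1), acc.2 ++ [ch])

def all_keys_alt (key : String) : List String :=
  let r := key.toList.foldl pvStepB ([], [])
  key :: (r.1.reverse).map String.mk

-- ===== PRECONDITION & SPEC =====
def Spec_all_keys (key : String) (out : List String) : Prop := out = all_keys_alt key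
instance (key : String) (out : List String) : Decidable (Spec_all_keys key out) := by unfold Spec_all_keys; infer_instance

-- ===== CLAIM (what is proved, stated in full; the proofs are below) =====
def Claim_equal_all_keys : Prop := ∀ (key : String), Dom_all_keys key → Spec_all_keys key (all_keys key)

-- ===== LEMMAS AND PROOFS =====

-- ascending list of dot positions below n
def pvDpos (cs : List Char) (n : Nat) : List Nat :=
  (List.range n).filter (fun i => cs.getD i ' ' = '.')

theorem pvDpos_succ (cs : List Char) (m : Nat) :
    pvDpos cs (m + 1) = pvDpos cs m ++ (if cs.getD m ' ' = '.' then [m] else []) := by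
  simp only [pvDpos, List.range_succ, List.filter_append, List.filter_cons, List.filter_nil]
  split <;> simp_all

theorem pvRindexDot_none (cs : List Char) (n : Nat) (h : pvRindexDot cs n = none) :
    pvDpos cs n = [] := by
  induction n with
  | zero => simp [pvDpos]
  | succ k ih =>
    simp only [pvRindexDot] at h
    split at h
    · exact absurd h (by simp)
    · rw [pvDpos_succ, ih h]; simp_all

theorem pvRindexDot_some (cs : List Char) (n m : Nat) (h : pvRindexDot cs n = some m) :
    pvDpos cs n = pvDpos cs m ++ [m] := by
  induction n with
  | zero => simp [pvRindexDot] at h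
  | succ k ih =>
    simp only [pvRindexDot] at h
    split at h
    · cases h; rw [pvDpos_succ]; simp_all
    · rw [pvDpos_succ, ih h]; simp_all

theorem pvLoopA_eq (cs : List Char) (n : Nat) :
    pvLoopA cs n = ((pvDpos cs n).map (cs.take ·)).reverse := by
  induction n using Nat.strong_induction_on with
  | _ n ih =>
    rw [pvLoopA]
    split
    · rename_i h; rw [pvRindexDot_none cs n h]; simp
    · rename_i m h
      rw [ih m (pvRindexDot_lt cs n m h), pvRindexDot_some cs n m h]
      simp

-- B's recorded prefixes, as structural recursion on the characters
def pvDotPrefixes : List Char → List (List Char)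
  | [] => []
  | c :: rest => (if c = '.' then [[]] else []) ++ (pvDotPrefixes rest).map (c :: ·)

theorem pvFoldB_eq (cs : List Char) : ∀ (pre : List (List Char)) (cur : List Char),
    cs.foldl pvStepB (pre, cur) = (pre ++ (pvDotPrefixes cs).map (cur ++ ·), cur ++ cs) := by
  induction cs with
  | nil => intro pre cur; simp [pvDotPrefixes]
  | cons c rest ih =>
    intro pre cur
    simp only [List.foldl_cons, pvStepB, pvDotPrefixes, ih]
    by_cases hc : c = '.' <;> simp [hc, List.map_map, Function.comp]

theorem pvDotPrefixes_eq (cs : List Char) :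
    pvDotPrefixes cs = (pvDpos cs cs.length).map (cs.take ·) := by
  induction cs with
  | nil => simp [pvDotPrefixes, pvDpos]
  | cons c rest ih =>
    have hrange : pvDpos (c :: rest) (rest.length + 1)
        = (if c = '.' then [0] else []) ++ (pvDpos rest rest.length).map (· + 1) := by
      simp only [pvDpos, List.range_succ_eq_map, List.filter_cons, List.filter_map]
      by_cases hc : c = '.' <;> (simp [hc, Function.comp_def]; rfl)
    simp only [pvDotPrefixes, List.length_cons, hrange, ih, List.map_append, List.map_map,
      Function.comp]
    by_cases hc : c = '.' <;> simp [hc]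

-- ===== VERDICT (by name: the statement is the Claim_ definition above) =====
theorem all_keys_spec : Claim_equal_all_keys := by
  intro key _
  unfold Spec_all_keys
  simp only [all_keys, all_keys_alt, pvFoldB_eq, pvLoopA_eq, pvDotPrefixes_eq]
  simp
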